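-- pv_equiv track=rewrite | github.com/aoitan/kuroko | kuroko/memo_collector.py | _pop_matching_chunk
-- ===== SOURCE A (Python) =====
-- from typing import Dict, Iterable, List, Optional, Set
--
-- def _pop_matching_chunk(existing_chunks: List[Dict], chunk: Dict) -> Optional[Dict]:
--     for index, existing in enumerate(existing_chunks):
--         if existing["chunk_index"] == chunk["chunk_index"] and existing["chunk_hash"] == chunk["chunk_hash"]:
--             return existing_chunks.pop(index)
--     for index, existing in enumerate(existing_chunks):
--         if existing["chunk_hash"] == chunk["chunk_hash"]:
--             return existing_chunks.pop(index)
--     return None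
-- ===== SOURCE B (Python) =====
-- def _pop_matching_chunk(existing_chunks, chunk):
--     candidates = [
--         (0 if existing["chunk_index"] == chunk["chunk_index"] else 1, pos, existing)
--         for pos, existing in enumerate(existing_chunks)
--         if existing["chunk_hash"] == chunk["chunk_hash"]
--     ]
--     if not candidates:
--         return None
--     _rank, pos, best = min(candidates)
--     existing_chunks.pop(pos)
--     return best
-- ===== Notes on version B (the rewrite author's own statement) =====
-- stated objective: alternative
-- what changed: Replaces A's two sequential scans (exact index+hash match first, then hash-only) by building one ranked candidate list (rank 0 = exact match, rank 1 = hash-only) and taking the lexicographic minimum of (rank, position), then popping that position.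
import Mathlib
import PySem

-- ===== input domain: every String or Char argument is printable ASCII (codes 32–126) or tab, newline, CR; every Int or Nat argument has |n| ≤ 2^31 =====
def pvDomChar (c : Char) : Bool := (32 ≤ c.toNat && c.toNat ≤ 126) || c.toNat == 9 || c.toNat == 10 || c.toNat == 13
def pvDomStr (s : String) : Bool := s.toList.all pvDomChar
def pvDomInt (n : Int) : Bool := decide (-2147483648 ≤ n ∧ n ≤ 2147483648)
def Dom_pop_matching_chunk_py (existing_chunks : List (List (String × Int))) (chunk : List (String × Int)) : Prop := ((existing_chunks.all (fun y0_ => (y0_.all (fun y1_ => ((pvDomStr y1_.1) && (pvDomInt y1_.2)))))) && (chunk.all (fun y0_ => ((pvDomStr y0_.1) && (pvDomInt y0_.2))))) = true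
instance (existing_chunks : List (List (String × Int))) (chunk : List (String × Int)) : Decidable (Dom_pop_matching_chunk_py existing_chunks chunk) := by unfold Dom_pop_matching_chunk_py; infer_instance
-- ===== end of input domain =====

-- ===== PORT A =====
-- B replaces A's two scans by a ranked-candidate list and a lexicographic min; the proved equivalence is
-- about the RETURN value; both Pythons also remove the same element from existing_chunks in place.
-- d[k] on an association-list dict: first match; the default 0 is never reached under Pre_ (keys present).
def pvGet (d : List (String × Int)) (k : String) : Int :=
  match d.find? (fun p => p.1 == k) with
  | some p => p.2
  | none => 0

-- first loop of A: first element matching both chunk_index and chunk_hash (pop(index) returns that element)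
def pvLoopA1 (ci ch : Int) : List (Int × List (String × Int)) → Option (List (String × Int))
  | [] => none
  | (_, e) :: rest =>
    if (pvGet e "chunk_index" == ci && pvGet e "chunk_hash" == ch) then some e
    else pvLoopA1 ci ch rest

-- second loop of A: first element matching chunk_hash
def pvLoopA2 (ch : Int) : List (Int × List (String × Int)) → Option (List (String × Int))
  | [] => none
  | (_, e) :: rest =>
    if (pvGet e "chunk_hash" == ch) then some e
    else pvLoopA2 ch rest

def pop_matching_chunk_py (existing_chunks : List (List (String × Int))) (chunk : List (String × Int)) : Option (List (String × Int)) :=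
  match pvLoopA1 (pvGet chunk "chunk_index") (pvGet chunk "chunk_hash") (PySem.List.enumerate existing_chunks 0) with
  | some e => some e
  | none => pvLoopA2 (pvGet chunk "chunk_hash") (PySem.List.enumerate existing_chunks 0)

-- ===== PORT B =====
-- one candidate per hash-matching element: (rank, position, element); rank 0 = index also matches
def pvCand (ci ch : Int) (p : Int × List (String × Int)) : Option (Int × Int × List (String × Int)) :=
  if pvGet p.2 "chunk_hash" == ch then
    some ((if pvGet p.2 "chunk_index" == ci then 0 else 1), p.1, p.2)
  else none

-- Python's tuple min compares (rank, position) lexicographically; the element component is never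
-- compared because positions are distinct, so comparing only the first two fields is exact.
def pvTupLt (a b : Int × Int × List (String × Int)) : Bool :=
  decide (a.1 < b.1) || (a.1 == b.1 && decide (a.2.1 < b.2.1))

-- min(candidates): fold keeping the first smallest (Python min keeps the first extremal element)
def pvMin (c : Int × Int × List (String × Int)) (cs : List (Int × Int × List (String × Int))) :
    Int × Int × List (String × Int) :=
  cs.foldl (fun m y => if pvTupLt y m then y else m) c

def pop_matching_chunk_py_alt (existing_chunks : List (List (String × Int))) (chunk : List (String × Int)) : Option (List (String × Int)) :=
  match (PySem.List.enumerate existing_chunks 0).filterMap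
          (pvCand (pvGet chunk "chunk_index") (pvGet chunk "chunk_hash")) with
  | [] => none
  | c :: rest => some (pvMin c rest).2.2

-- ===== PRECONDITION & SPEC =====
def pvHasKeys (d : List (String × Int)) : Bool :=
  d.any (fun p => p.1 == "chunk_index") && d.any (fun p => p.1 == "chunk_hash")

-- Pre_ excludes non-empty lists in which chunk or some element lacks the key "chunk_index" or
-- "chunk_hash": there Python raises KeyError (A before reaching a match, B while building the
-- candidate list); it over-excludes only the rare case where the malformed dict sits after the
-- match A returns, where B's comprehension still raises KeyError.
def Pre_pop_matching_chunk_py (existing_chunks : List (List (String × Int))) (chunk : List (String × Int)) : Prop :=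
  (existing_chunks.isEmpty || (pvHasKeys chunk && existing_chunks.all pvHasKeys)) = true
instance (existing_chunks : List (List (String × Int))) (chunk : List (String × Int)) : Decidable (Pre_pop_matching_chunk_py existing_chunks chunk) := by unfold Pre_pop_matching_chunk_py; infer_instance

def pvWitness_pop_matching_chunk_py : (List (List (String × Int))) × (List (String × Int)) :=
  ([[("chunk_index", 1), ("chunk_hash", 2)], [("chunk_index", 3), ("chunk_hash", 2)]],
   [("chunk_index", 3), ("chunk_hash", 2)])

def Spec_pop_matching_chunk_py (existing_chunks : List (List (String × Int))) (chunk : List (String × Int)) (out : Option (List (String × Int))) : Prop := out = pop_matching_chunk_py_alt existing_chunks chunk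
instance (existing_chunks : List (List (String × Int))) (chunk : List (String × Int)) (out : Option (List (String × Int))) : Decidable (Spec_pop_matching_chunk_py existing_chunks chunk out) := by unfold Spec_pop_matching_chunk_py; infer_instance

-- ===== CLAIM (what is proved, stated in full; the proofs are below) =====
def Claim_equal_pop_matching_chunk_py : Prop := ∀ (existing_chunks : List (List (String × Int))) (chunk : List (String × Int)), Dom_pop_matching_chunk_py existing_chunks chunk → Pre_pop_matching_chunk_py existing_chunks chunk → Spec_pop_matching_chunk_py existing_chunks chunk (pop_matching_chunk_py existing_chunks chunk)

-- ===== LEMMAS AND PROOFS =====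
-- the fold keeps its accumulator when nothing beats it
theorem pvMin_keep (c : Int × Int × List (String × Int)) (cs : List (Int × Int × List (String × Int)))
    (h : ∀ y ∈ cs, pvTupLt y c = false) : pvMin c cs = c := by
  induction cs with
  | nil => rfl
  | cons y t ih =>
    have hy := h y (by simp)
    simpa [pvMin, hy] using ih (fun z hz => h z (by simp [hz]))

-- lexicographic min over a list whose ranks are 0/1 and whose positions strictly increase:
-- the first rank-0 candidate if any, else the head
theorem pvMin_char (cs : List (Int × Int × List (String × Int))) :
    ∀ c, (∀ y ∈ c :: cs, y.1 = 0 ∨ y.1 = 1) →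
    (c :: cs).Pairwise (fun a b => a.2.1 < b.2.1) →
    pvMin c cs = ((c :: cs).find? (fun y => y.1 == 0)).getD c := by
  induction cs with
  | nil =>
    intro c hr _
    rcases hr c (by simp) with h0 | h1
    · simp [pvMin, List.find?, h0]
    · simp [pvMin, List.find?, h1]
  | cons y t ih =>
    intro c hr hp
    have hcy : c.2.1 < y.2.1 := (List.pairwise_cons.1 hp).1 y (by simp)
    have hct : ∀ z ∈ t, c.2.1 < z.2.1 := fun z hz => (List.pairwise_cons.1 hp).1 z (by simp [hz])
    have hyt : (y :: t).Pairwise (fun a b => a.2.1 < b.2.1) := (List.pairwise_cons.1 hp).2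
    rcases hr c (by simp) with hc0 | hc1
    · -- c has rank 0: nothing beats it
      have hmin : pvMin c (y :: t) = c := by
        apply pvMin_keep
        intro z hz
        rcases hr z (List.mem_cons_of_mem c hz) with hz0 | hz1
        · have hlt : c.2.1 < z.2.1 := by
            rcases List.mem_cons.1 hz with rfl | hm
            · exact hcy
            · exact hct z hm
          simp [pvTupLt, hz0, hc0]
          omega
        · simp [pvTupLt, hz1, hc0]
      simp [hmin, List.find?, hc0]
    · rcases hr y (by simp) with hy0 | hy1
      · -- y has rank 0, beats c (rank 1); then nothing beats y
        have hlt : pvTupLt y c = true := by simp [pvTupLt, hy0, hc1]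
        have hmin : pvMin y t = y := by
          apply pvMin_keep
          intro z hz
          have hyz : y.2.1 < z.2.1 := (List.pairwise_cons.1 hyt).1 z hz
          rcases hr z (by simp [hz]) with hz0 | hz1
          · simp [pvTupLt, hz0, hy0]
            omega
          · simp [pvTupLt, hz1, hy0]
        have hstep : pvMin c (y :: t) = pvMin y t := by simp [pvMin, hlt]
        simp [hstep, hmin, List.find?, hc1, hy0]
      · -- y has rank 1: c stays, recurse on t with head c
        have hlt : pvTupLt y c = false := by
          simp [pvTupLt, hy1, hc1]
          omega
        have hstep : pvMin c (y :: t) = pvMin c t := by simp [pvMin, hlt]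
        have hrct : ∀ z ∈ c :: t, z.1 = 0 ∨ z.1 = 1 := by
          intro z hz
          rcases List.mem_cons.1 hz with rfl | hm
          · exact hr z (by simp)
          · exact hr z (by simp [hm])
        have hpct : (c :: t).Pairwise (fun a b => a.2.1 < b.2.1) :=
          List.pairwise_cons.2 ⟨hct, (List.pairwise_cons.1 hyt).2⟩
        rw [hstep, ih c hrct hpct]
        simp [List.find?, hc1, hy1]

-- A's first loop = first rank-0 candidate
theorem findZero_eq_loopA1 (ci ch : Int) (l : List (Int × List (String × Int))) :
    ((l.filterMap (pvCand ci ch)).find? (fun y => y.1 == 0)).map (fun c => c.2.2)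
      = pvLoopA1 ci ch l := by
  induction l with
  | nil => rfl
  | cons p t ih =>
    obtain ⟨i, e⟩ := p
    by_cases hh : pvGet e "chunk_hash" = ch
    · by_cases hi : pvGet e "chunk_index" = ci
      · simp [pvCand, pvLoopA1, hh, hi]
      · simpa [pvCand, pvLoopA1, hh, hi] using ih
    · simpa [pvCand, pvLoopA1, hh] using ih

-- A's second loop = first candidate
theorem head_eq_loopA2 (ci ch : Int) (l : List (Int × List (String × Int))) :
    ((l.filterMap (pvCand ci ch)).head?).map (fun c => c.2.2) = pvLoopA2 ch l := by
  induction l with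
  | nil => rfl
  | cons p t ih =>
    obtain ⟨i, e⟩ := p
    by_cases hh : pvGet e "chunk_hash" = ch
    · simp [pvCand, pvLoopA2, hh]
    · simpa [pvCand, pvLoopA2, hh] using ih

theorem cand_rank (ci ch : Int) (l : List (Int × List (String × Int))) :
    ∀ y ∈ l.filterMap (pvCand ci ch), y.1 = 0 ∨ y.1 = 1 := by
  intro y hy
  obtain ⟨p, _, hp⟩ := List.mem_filterMap.1 hy
  unfold pvCand at hp
  split at hp
  · cases hp; split <;> simp
  · cases hp

theorem cand_pairwise (ci ch : Int) (l : List (Int × List (String × Int)))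
    (h : l.Pairwise (fun a b => a.1 < b.1)) :
    (l.filterMap (pvCand ci ch)).Pairwise (fun a b => a.2.1 < b.2.1) := by
  induction l with
  | nil => simp
  | cons p t ih =>
    have h1 := (List.pairwise_cons.1 h).1
    have h2 := ih (List.pairwise_cons.1 h).2
    by_cases hc : pvCand ci ch p = none
    · simpa [List.filterMap_cons, hc] using h2
    · obtain ⟨y, hy⟩ := Option.ne_none_iff_exists'.1 hc
      rw [List.filterMap_cons, hy]
      refine List.pairwise_cons.2 ⟨?_, h2⟩
      intro z hz
      obtain ⟨q, hq, hqz⟩ := List.mem_filterMap.1 hz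
      have hyp : y.2.1 = p.1 := by
        unfold pvCand at hy; split at hy
        · cases hy; rfl
        · cases hy
      have hzq : z.2.1 = q.1 := by
        unfold pvCand at hqz; split at hqz
        · cases hqz; rfl
        · cases hqz
      rw [hyp, hzq]; exact h1 q hq

-- main: B's min-of-candidates equals A's two-loop result
theorem main_eq (ci ch : Int) (xs : List (List (String × Int))) :
    (match (PySem.List.enumerate xs 0).filterMap (pvCand ci ch) with
     | [] => none
     | c :: rest => some (pvMin c rest).2.2)
      = match pvLoopA1 ci ch (PySem.List.enumerate xs 0) with
        | some e => some e
        | none => pvLoopA2 ch (PySem.List.enumerate xs 0) := by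
  have hpw := cand_pairwise ci ch (PySem.List.enumerate xs 0)
    (PySem.List.pairwise_lt_enumerate xs 0)
  have hrk := cand_rank ci ch (PySem.List.enumerate xs 0)
  rw [← findZero_eq_loopA1 ci ch, ← head_eq_loopA2 ci ch]
  cases hc : (PySem.List.enumerate xs 0).filterMap (pvCand ci ch) with
  | nil => simp
  | cons c rest =>
    rw [hc] at hpw hrk
    show some (pvMin c rest).2.2 = _
    rw [pvMin_char rest c hrk hpw]
    cases hf : (c :: rest).find? (fun y => y.1 == 0) with
    | none => simp
    | some c0 => simp

-- ===== VERDICT (by name: the statement is the Claim_ definition above) =====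
theorem pop_matching_chunk_py_spec : Claim_equal_pop_matching_chunk_py := by
  intro existing_chunks chunk _ _
  unfold Spec_pop_matching_chunk_py pop_matching_chunk_py pop_matching_chunk_py_alt
  exact (main_eq _ _ _).symm
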